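-- pv_equiv track=rewrite | github.com/oh5221/programmers | 프로그래머스/1/388351. 유연근무제/유연근무제.py | solution
-- ===== SOURCE A (Python) =====
-- def solution(schedules, timelogs, startday):
--     answer = 0
--     # 희망시각 1150일 때 -> 11 * 60 + 50 = 710
--     # 1200까지 오키 -> 12 * 60 = 720
--     # 1210 도착했다면 -> 12 * 60 + 10 = 730
--
--     for i, timelog in enumerate(timelogs):
--         count = 0
--         active_time = schedules[i] // 100 * 60 + schedules[i] % 100 + 10
--         for idx, time in enumerate(timelog):
--             time = time // 100 * 60 + time % 100
--             if startday == 7: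
--                 startday = 1
--                 continue
--             if startday < 6 and time <= active_time:
--                 count += 1
--
--             startday += 1
--         if count == 5:
--             answer += 1
--     return answer
-- ===== SOURCE B (Python) =====
-- def solution(schedules, timelogs, startday):
--     # Pass 1: build a weekday calendar for the whole flat sequence of logged
--     # days, advancing one day-of-week counter (days 1-5 count, 7 wraps to 1).
--     flags = []
--     day = startday
--     for _ in range(sum(map(len, timelogs))):
--         if day == 7:
--             flags.append(False)
--             day = 1
--         else:
--             flags.append(day < 6)
--             day += 1
--     # Pass 2: judge each employee against their slice of the calendar.
--     answer = 0
--     for sched, log in zip(schedules, timelogs):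
--         deadline = sched // 100 * 60 + sched % 100 + 10
--         week, flags = flags[:len(log)], flags[len(log):]
--         on_time = sum(1 for f, t in zip(week, log)
--                       if f and t // 100 * 60 + t % 100 <= deadline)
--         answer += on_time == 5
--     return answer
-- ===== Notes on version B (the rewrite author's own statement) =====
-- stated objective: alternative
-- what changed: B splits A's single interleaved loop into two passes: it precomputes the weekday calendar for the flat sequence of logged days once, then judges each employee against their slice of it with a filtered count, removing A's per-log mutable counter state; Pre_ excludes only inputs where schedules is shorter than timelogs (A raises IndexError).
import Mathlib
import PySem

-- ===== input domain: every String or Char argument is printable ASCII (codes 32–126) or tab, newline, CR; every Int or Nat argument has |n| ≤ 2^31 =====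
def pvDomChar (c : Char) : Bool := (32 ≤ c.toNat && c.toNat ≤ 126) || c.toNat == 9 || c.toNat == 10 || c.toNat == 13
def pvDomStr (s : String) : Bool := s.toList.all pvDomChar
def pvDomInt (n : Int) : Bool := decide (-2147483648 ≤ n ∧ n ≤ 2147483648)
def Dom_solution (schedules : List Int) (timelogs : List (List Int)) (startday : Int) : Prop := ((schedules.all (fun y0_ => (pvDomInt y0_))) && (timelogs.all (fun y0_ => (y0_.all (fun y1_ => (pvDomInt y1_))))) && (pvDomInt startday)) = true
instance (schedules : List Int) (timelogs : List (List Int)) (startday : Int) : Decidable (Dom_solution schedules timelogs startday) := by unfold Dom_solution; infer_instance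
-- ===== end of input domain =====

-- B precomputes the weekday calendar in one pass and then judges each employee
-- against their slice of it, instead of A's per-log interleaved counter state.

-- ===== PORT A =====
-- inner loop over one timelog, carrying (count, startday)
def solInnerA (active : Int) (count sd : Int) : List Int → Int × Int
  | [] => (count, sd)
  | time :: rest =>
    let t := PySem.Int.floordiv time 100 * 60 + PySem.Int.mod time 100
    if sd = 7 then solInnerA active count 1 rest
    else
      let count' := if sd < 6 ∧ t ≤ active then count + 1 else count
      solInnerA active count' (sd + 1) rest

-- outer loop over timelogs, carrying (answer, startday); schedules[i] raises
-- IndexError in Python when out of range — Pre_solution excludes that, the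
-- default 0 is never used under Pre_.
def solOuterA (schedules : List Int) (i : Int) (answer sd : Int) : List (List Int) → Int
  | [] => answer
  | log :: rest =>
    let sched := PySem.List.pyGetD schedules i 0
    let active := PySem.Int.floordiv sched 100 * 60 + PySem.Int.mod sched 100 + 10
    let r := solInnerA active 0 sd log
    solOuterA schedules (i + 1) (if r.1 = 5 then answer + 1 else answer) r.2 rest

def solution (schedules : List Int) (timelogs : List (List Int)) (startday : Int) : Int :=
  solOuterA schedules 0 0 startday timelogs

-- ===== PORT B =====
-- pass 1: the weekday calendar for the flat sequence of logged days
def buildFlags (day : Int) : Nat → List Bool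
  | 0 => []
  | n + 1 =>
    if day = 7 then false :: buildFlags 1 n
    else decide (day < 6) :: buildFlags (day + 1) n

-- the generator-sum over zip(week, log)
def onTimeB (deadline c : Int) : List (Bool × Int) → Int
  | [] => c
  | (f, t) :: rest =>
    let c' := if f ∧ PySem.Int.floordiv t 100 * 60 + PySem.Int.mod t 100 ≤ deadline
              then c + 1 else c
    onTimeB deadline c' rest

-- pass 2: consume the calendar slice by slice
def outerB (flags : List Bool) (answer : Int) : List (Int × List Int) → Int
  | [] => answer
  | (sched, log) :: rest =>
    let deadline := PySem.Int.floordiv sched 100 * 60 + PySem.Int.mod sched 100 + 10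
    let week := flags.take log.length
    let flags' := flags.drop log.length
    let onTime := onTimeB deadline 0 (List.zip week log)
    outerB flags' (if onTime = 5 then answer + 1 else answer) rest

def solution_alt (schedules : List Int) (timelogs : List (List Int)) (startday : Int) : Int :=
  outerB (buildFlags startday (timelogs.map List.length).sum) 0 (List.zip schedules timelogs)

-- ===== PRECONDITION & SPEC =====
-- Pre_ excludes exactly the inputs where A raises IndexError (schedules[i] is
-- read for every index of timelogs).
def Pre_solution (schedules : List Int) (timelogs : List (List Int)) (startday : Int) : Prop :=
  timelogs.length ≤ schedules.length
instance (schedules : List Int) (timelogs : List (List Int)) (startday : Int) : Decidable (Pre_solution schedules timelogs startday) := by unfold Pre_solution; infer_instance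
def pvWitness_solution : List Int × List (List Int) × Int :=
  ([900, 1000], [[855, 900, 905, 900, 905, 900, 905], [1005, 1000, 1000, 1000, 1000, 1000, 1000]], 1)

def Spec_solution (schedules : List Int) (timelogs : List (List Int)) (startday : Int) (out : Int) : Prop := out = solution_alt schedules timelogs startday
instance (schedules : List Int) (timelogs : List (List Int)) (startday : Int) (out : Int) : Decidable (Spec_solution schedules timelogs startday out) := by unfold Spec_solution; infer_instance

-- ===== CLAIM (what is proved, stated in full; the proofs are below) =====
def Claim_equal_solution : Prop := ∀ (schedules : List Int) (timelogs : List (List Int)) (startday : Int), Dom_solution schedules timelogs startday → Pre_solution schedules timelogs startday → Spec_solution schedules timelogs startday (solution schedules timelogs startday)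

-- ===== LEMMAS AND PROOFS =====

-- the day state after n steps of A's counter (and of B's calendar builder)
def afterDays (s : Int) : Nat → Int
  | 0 => s
  | n + 1 => afterDays (if s = 7 then 1 else s + 1) n

theorem buildFlags_succ (s : Int) (n : Nat) :
    buildFlags s (n + 1)
      = if s = 7 then false :: buildFlags 1 n else decide (s < 6) :: buildFlags (s + 1) n := rfl

theorem afterDays_succ (s : Int) (n : Nat) :
    afterDays s (n + 1) = afterDays (if s = 7 then 1 else s + 1) n := rfl

theorem buildFlags_length (s : Int) (n : Nat) : (buildFlags s n).length = n := by
  induction n generalizing s with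
  | zero => rfl
  | succ n ih =>
    unfold buildFlags
    split <;> simp [ih]

theorem buildFlags_append (s : Int) (n m : Nat) :
    buildFlags s (n + m) = buildFlags s n ++ buildFlags (afterDays s n) m := by
  induction n generalizing s with
  | zero => simp [buildFlags, afterDays]
  | succ n ih =>
    have h : n + 1 + m = (n + m) + 1 := by omega
    rw [h]
    by_cases h7 : s = 7
    · rw [buildFlags_succ, buildFlags_succ, afterDays_succ, if_pos h7, if_pos h7, if_pos h7, ih]
      rfl
    · rw [buildFlags_succ, buildFlags_succ, afterDays_succ, if_neg h7, if_neg h7, if_neg h7, ih]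
      rfl

-- A's stateful pass over one log equals B's filtered count over its calendar
-- slice, and the day state advances by the log's length
theorem inner_eq (log : List Int) (s c active : Int) :
    solInnerA active c s log
      = (onTimeB active c (List.zip (buildFlags s log.length) log), afterDays s log.length) := by
  induction log generalizing s c with
  | nil => simp [solInnerA, onTimeB, buildFlags, afterDays]
  | cons t rest ih =>
    simp only [solInnerA, List.length_cons, buildFlags, afterDays]
    by_cases h7 : s = 7
    · rw [if_pos h7, if_pos h7, if_pos h7]
      simp only [List.zip_cons_cons, onTimeB]
      rw [if_neg (by simp)]
      exact ih 1 c
    · rw [if_neg h7, if_neg h7, if_neg h7]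
      simp only [List.zip_cons_cons, onTimeB, decide_eq_true_eq]
      exact ih (s + 1) _

-- outer loops agree, with the index into schedules and the calendar aligned
theorem outer_eq (tls : List (List Int)) (schedules : List Int) (s : Int)
    (i : Nat) (ans : Int) (h : i + tls.length ≤ schedules.length) :
    solOuterA schedules (i : Int) ans s tls
      = outerB (buildFlags s (tls.map List.length).sum) ans (List.zip (schedules.drop i) tls) := by
  induction tls generalizing i s ans with
  | nil => simp [solOuterA, outerB]
  | cons log rest ih =>
    have hi : i < schedules.length := by simp at h; omega
    have hdrop : schedules.drop i = schedules[i] :: schedules.drop (i + 1) :=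
      List.drop_eq_getElem_cons hi
    rw [hdrop]
    simp only [solOuterA, outerB, List.zip_cons_cons, List.map_cons, List.sum_cons]
    have hget : PySem.List.pyGetD schedules (i : Int) 0 = schedules[i] := by
      rw [PySem.List.pyGetD_natCast]; exact List.getD_eq_getElem schedules 0 hi
    rw [hget, inner_eq log s 0]
    have hsplit := buildFlags_append s log.length (rest.map List.length).sum
    have hlen := buildFlags_length s log.length
    have htake : (buildFlags s (log.length + (rest.map List.length).sum)).take log.length
        = buildFlags s log.length := by
      rw [hsplit, List.take_append_of_le_length (by rw [hlen]), List.take_of_length_le (by rw [hlen])]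
    have hdropf : (buildFlags s (log.length + (rest.map List.length).sum)).drop log.length
        = buildFlags (afterDays s log.length) (rest.map List.length).sum := by
      rw [hsplit, List.drop_append_of_le_length (by rw [hlen]), List.drop_of_length_le (by rw [hlen])]
      simp
    rw [htake, hdropf]
    have hcast1 : ((i : Int) + 1) = ((i + 1 : Nat) : Int) := by push_cast; ring
    rw [hcast1, ih (afterDays s log.length) (i + 1) _ (by simp at h ⊢; omega)]

-- ===== VERDICT (by name: the statement is the Claim_ definition above) =====
theorem solution_spec : Claim_equal_solution := by
  intro schedules timelogs startday _ hpre
  unfold Spec_solution solution solution_alt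
  calc solOuterA schedules 0 0 startday timelogs
      = solOuterA schedules ((0 : Nat) : Int) 0 startday timelogs := rfl
    _ = outerB (buildFlags startday (timelogs.map List.length).sum) 0
          (List.zip (schedules.drop 0) timelogs) :=
        outer_eq timelogs schedules startday 0 0 (by simpa using hpre)
    _ = outerB (buildFlags startday (timelogs.map List.length).sum) 0
          (List.zip schedules timelogs) := by rw [List.drop_zero]
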